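-- pv_equiv track=rewrite | github.com/dytttf/openget | graper/util.py | url_to_mid
-- ===== SOURCE A (Python) =====
-- ALPHABET = "0123456789abcdefghijklmnopqrstuvwxyzABCDEFGHIJKLMNOPQRSTUVWXYZ"
--
-- def base62_decode(string, alphabet=ALPHABET):
--     """Decode a Base X encoded string into the number
--
--     Arguments:
--     - `string`: The encoded string
--     - `alphabet`: The alphabet to use for encoding
--     """
--     base = len(alphabet)
--     strlen = len(string)
--     num = 0
--
--     idx = 0
--     for char in string:
--         power = strlen - (idx + 1)
--         num += alphabet.index(char) * (base ** power)
--         idx += 1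
--
--     return num
--
-- def url_to_mid(url):
--     """"""
--     url = str(url)[::-1]
--     size = len(url) // 4 if len(url) % 4 == 0 else len(url) // 4 + 1
--     result = []
--     for i in range(size):
--         s = url[i * 4 : (i + 1) * 4][::-1]
--         s = str(base62_decode(str(s)))
--         s_len = len(s)
--         if i < size - 1 and s_len < 7:
--             s = (7 - s_len) * "0" + s
--         result.append(s)
--     result.reverse()
--     return int("".join(result))
-- ===== SOURCE B (Python) =====
-- ALPHABET = "0123456789abcdefghijklmnopqrstuvwxyzABCDEFGHIJKLMNOPQRSTUVWXYZ"
--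
-- def _decode62(s):
--     # Horner: left-to-right single pass, no powers.
--     num = 0
--     for ch in s:
--         num = num * 62 + ALPHABET.index(ch)
--     return num
--
-- def url_to_mid(url):
--     url = str(url)
--     n = len(url)
--     head = n % 4 or 4
--     parts = [str(_decode62(url[:head]))]
--     for i in range(head, n, 4):
--         parts.append(str(_decode62(url[i:i + 4])).zfill(7))
--     return int("".join(parts))
-- ===== Notes on version B (the rewrite author's own statement) =====
-- stated objective: simpler
-- what changed: base62_decode is replaced by a left-to-right Horner accumulator (num = num*62 + index, no power computation), and the double string reversal is replaced by direct right-aligned chunking: the leftmost chunk is url[:len%4 or 4] and the remaining 4-char chunks are scanned left-to-right, zero-padding all but the first.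
-- outside the precondition, e.g. on url_to_mid(''): A raises ValueError, B returns 0
import Mathlib
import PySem

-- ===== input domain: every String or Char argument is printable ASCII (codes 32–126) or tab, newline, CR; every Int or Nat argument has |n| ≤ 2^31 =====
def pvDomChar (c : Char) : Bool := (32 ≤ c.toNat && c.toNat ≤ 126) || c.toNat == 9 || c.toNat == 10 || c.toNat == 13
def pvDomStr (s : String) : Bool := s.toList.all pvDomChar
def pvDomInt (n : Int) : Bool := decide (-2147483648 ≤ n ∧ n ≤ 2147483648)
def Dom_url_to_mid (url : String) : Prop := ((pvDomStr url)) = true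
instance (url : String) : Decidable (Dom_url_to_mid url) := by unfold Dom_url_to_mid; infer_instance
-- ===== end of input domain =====

-- B replaces A's power-sum base62 decode by a single Horner accumulator and chunks the
-- string right-aligned from the left instead of A's double global reversal (objective: simpler).

-- ===== PORT A =====
def pvALPH : List Char := "0123456789abcdefghijklmnopqrstuvwxyzABCDEFGHIJKLMNOPQRSTUVWXYZ".toList

-- ALPHABET.index(char): Python raises ValueError when the char is absent (excluded by Pre_);
-- there this helper returns 0 instead.
def pvAIdx (c : Char) : Int := (((PySem.List.index? pvALPH c).getD 0 : Nat) : Int)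

def base62_decode (s : List Char) : Int :=
  -- base = len(alphabet) = 62; state (num, idx); power = strlen - (idx + 1) is ≥ 0 in the
  -- loop, so the Nat subtraction is exact.
  let strlen := s.length
  (s.foldl (fun (st : Int × Nat) c =>
      (st.1 + pvAIdx c * (62 : Int) ^ (strlen - (st.2 + 1)), st.2 + 1)) ((0 : Int), (0 : Nat))).1

def url_to_mid (url : String) : Int :=
  let cs := url.toList.reverse                                   -- url = str(url)[::-1]
  let n : Nat := cs.length
  let size : Nat := if n % 4 = 0 then n / 4 else n / 4 + 1       -- len//4 on a Nat is exact
  let result := (PySem.List.pyRange 0 (size : Int) 1).foldl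
    (fun (res : List (List Char)) (i : Int) =>
      let s := (PySem.List.slice cs (some (i * 4)) (some ((i + 1) * 4))).reverse
      let s := PySem.Int.toChars (base62_decode s)
      let slen := s.length
      let s := if i < (size : Int) - 1 ∧ slen < 7 then List.replicate (7 - slen) '0' ++ s else s
      res ++ [s]) []
  -- int("".join(result)): ValueError on the empty url is excluded by Pre_; 0 there.
  (PySem.Int.ofChars? result.reverse.flatten).getD 0

-- ===== PORT B =====
def pvHorner62 (s : List Char) : Int :=
  s.foldl (fun num c => num * 62 + pvAIdx c) 0

-- str(v).zfill(7): exact for the sign-free decimal strings produced here.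
def pvZfill7 (s : List Char) : List Char :=
  if s.length < 7 then List.replicate (7 - s.length) '0' ++ s else s

def url_to_mid_alt (url : String) : Int :=
  let cs := url.toList
  let n : Nat := cs.length
  let head : Nat := if n % 4 = 0 then 4 else n % 4               -- n % 4 or 4
  let parts : List (List Char) := [PySem.Int.toChars (pvHorner62 (cs.take head))]
  let parts := (PySem.List.pyRange (head : Int) (n : Int) 4).foldl
    (fun (ps : List (List Char)) (i : Int) =>
      ps ++ [pvZfill7 (PySem.Int.toChars (pvHorner62
        (PySem.List.slice cs (some i) (some (i + 4)))))]) parts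
  (PySem.Int.ofChars? parts.flatten).getD 0

-- ===== PRECONDITION & SPEC =====
-- Pre_ excludes exactly the inputs where Python A raises ValueError: the empty string
-- (int("") at the end) and strings with a character outside ALPHABET (alphabet.index).
def Pre_url_to_mid (url : String) : Prop :=
  url.toList ≠ [] ∧ url.toList.all (fun c => pvALPH.contains c) = true
instance (url : String) : Decidable (Pre_url_to_mid url) := by unfold Pre_url_to_mid; infer_instance
def pvWitness_url_to_mid : String := "abc12"

def Spec_url_to_mid (url : String) (out : Int) : Prop := out = url_to_mid_alt url
instance (url : String) (out : Int) : Decidable (Spec_url_to_mid url out) := by unfold Spec_url_to_mid; infer_instance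

-- ===== CLAIM (what is proved, stated in full; the proofs are below) =====
def Claim_equal_url_to_mid : Prop := ∀ (url : String), Dom_url_to_mid url → Pre_url_to_mid url → Spec_url_to_mid url (url_to_mid url)

-- ===== LEMMAS AND PROOFS =====

-- canonical positional value of a digit string
def pvVal : List Char → Int
  | [] => 0
  | c :: t => pvAIdx c * 62 ^ t.length + pvVal t

theorem pvHorner62_gen (s : List Char) : ∀ a : Int,
    s.foldl (fun num c => num * 62 + pvAIdx c) a = a * 62 ^ s.length + pvVal s := by
  induction s with
  | nil => intro a; simp [pvVal]
  | cons c t ih =>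
      intro a
      simp only [List.foldl_cons, ih, pvVal, List.length_cons]
      ring

theorem pvAfold_gen (s : List Char) : ∀ (L k : Nat) (a : Int), L = k + s.length →
    (s.foldl (fun (st : Int × Nat) c =>
        (st.1 + pvAIdx c * (62 : Int) ^ (L - (st.2 + 1)), st.2 + 1)) (a, k)).1
      = a + pvVal s := by
  induction s with
  | nil => intro L k a h; simp [pvVal]
  | cons c t ih =>
      intro L k a h
      simp only [List.foldl_cons]
      rw [ih L (k + 1) _ (by simp at h; omega)]
      have hp : L - (k + 1) = t.length := by simp at h; omega
      rw [hp]
      simp [pvVal]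
      ring

theorem decode_eq (s : List Char) : base62_decode s = pvHorner62 s := by
  unfold base62_decode pvHorner62
  rw [pvAfold_gen s s.length 0 0 (by omega), pvHorner62_gen]
  simp

-- a 4-chunk of the reversed list, re-reversed, is a right-aligned chunk of the original
theorem revchunk (l : List Char) (a : Nat) (ha : a ≤ l.length) :
    ((l.reverse.drop a).take 4).reverse = (l.take (l.length - a)).drop (l.length - a - 4) := by
  have h1 : l.reverse.drop a = (l.take (l.length - a)).reverse := by
    rw [List.reverse_take]
    congr 1
    omega
  rw [h1, List.reverse_take, List.reverse_reverse, List.length_reverse]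
  congr 1
  simp

-- ===== VERDICT (by name: the statement is the Claim_ definition above) =====
theorem url_to_mid_spec : Claim_equal_url_to_mid := by
  intro url _ hpre
  unfold Spec_url_to_mid url_to_mid url_to_mid_alt
  simp only [PySem.List.foldl_append_singleton_eq_map, List.nil_append, List.length_reverse]
  set cs := url.toList with hcs
  set n := cs.length with hn
  have hnpos : 0 < n := by
    rw [hn]; exact List.length_pos_iff.mpr hpre.1
  set sz : Nat := if n % 4 = 0 then n / 4 else n / 4 + 1 with hsz
  set hd : Nat := if n % 4 = 0 then 4 else n % 4 with hhd
  have hszpos : 1 ≤ sz := by rw [hsz]; split_ifs with h <;> omega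
  have hd1 : 1 ≤ hd := by rw [hhd]; split_ifs with h <;> omega
  have hd4 : hd ≤ 4 := by rw [hhd]; split_ifs with h <;> omega
  have hsum : n = 4 * (sz - 1) + hd := by
    rw [hsz, hhd]; split_ifs with h <;> omega
  rw [PySem.List.pyRange_zero_natCast sz,
      PySem.List.pyRange_of_pos (hd : Int) (n : Int) (by norm_num), List.map_map, List.map_map]
  have hcnt : (if (hd : Int) < (n : Int) then (((n : Int) - hd + 4 - 1) / 4).toNat else 0) = sz - 1 := by
    split_ifs with h <;> omega
  rw [hcnt]
  refine congrArg (fun l : List (List Char) => (PySem.Int.ofChars? l.flatten).getD 0) ?_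
  apply List.ext_getElem
  · simp; omega
  · intro j h1 h2
    simp only [List.length_reverse, List.length_map, List.length_range] at h1
    rw [List.getElem_reverse]
    simp only [List.getElem_map, List.getElem_range, Function.comp_apply,
      List.length_map, List.length_range]
    -- the A-side chunk at position k, as a right-aligned chunk of cs
    have hchunk : ∀ k : Nat, k < sz →
        (PySem.List.slice cs.reverse (some ((k : Int) * 4)) (some (((k : Int) + 1) * 4))).reverse
          = (cs.take (n - 4 * k)).drop (n - 4 * k - 4) := by
      intro k hk
      have e1 : ((k : Int) * 4) = ((4 * k : Nat) : Int) := by push_cast; ring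
      have e2 : (((k : Int) + 1) * 4) = ((4 * k + 4 : Nat) : Int) := by push_cast; ring
      rw [e1, e2, PySem.List.slice_natCast]
      have e3 : 4 * k + 4 - 4 * k = 4 := by omega
      rw [e3, revchunk cs (4 * k) (by omega)]
    cases j with
    | zero =>
        -- leftmost (most significant) chunk: unpadded on both sides
        rw [List.getElem_append_left (by simp)]
        simp only [Nat.sub_zero, List.getElem_singleton]
        rw [hchunk (sz - 1) (by omega)]
        have e4 : n - 4 * (sz - 1) = hd := by omega
        rw [e4]
        have e5 : hd - 4 = 0 := by omega
        rw [e5, List.drop_zero]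
        have hc : ¬ (((sz - 1 : Nat) : Int) < (sz : Int) - 1) := by omega
        rw [if_neg (by exact fun h => hc h.1), decode_eq]
    | succ j =>
        have hj : j < sz - 1 := by omega
        rw [List.getElem_append_right (by simp)]
        simp only [List.length_singleton, Nat.add_sub_cancel, List.getElem_map,
          List.getElem_range, Function.comp_apply]
        rw [hchunk (sz - 1 - (j + 1)) (by omega)]
        have e4 : n - 4 * (sz - 1 - (j + 1)) = hd + 4 * j + 4 := by omega
        rw [e4]
        have e5 : hd + 4 * j + 4 - 4 = hd + 4 * j := by omega
        rw [e5, List.drop_take]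
        have e6 : hd + 4 * j + 4 - (hd + 4 * j) = 4 := by omega
        rw [e6]
        -- B-side slice
        have e7 : ((hd : Int) + 4 * (j : Int)) = ((hd + 4 * j : Nat) : Int) := by push_cast; ring
        have e8 : ((hd + 4 * j : Nat) : Int) + 4 = ((hd + 4 * j + 4 : Nat) : Int) := by push_cast; ring
        rw [e7, e8, PySem.List.slice_natCast, e6]
        -- pad condition on the A side holds
        have hc : ((sz - 1 - (j + 1) : Nat) : Int) < (sz : Int) - 1 := by omega
        rw [decode_eq]
        simp only [hc, true_and, pvZfill7]
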